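-- pv_equiv track=rewrite | github.com/ArmelRandy/tree-of-problems | top/concatenation/divide.py | divide_l2m
-- ===== SOURCE A (Python) =====
-- from typing import List
--
-- def divide_l2m(prompts: List[str]) -> List[List[str]]:
--     list_of_subproblems = []
--     for prompt in prompts:
--         sentences = prompt.split(", ")
--         subproblems = [f"{sentences[0]}, {sentences[1]}"]
--         for sentence in sentences[2:]:
--             subproblem = subproblems[-1]
--             subproblem += f", {sentence}"
--             subproblems.append(subproblem)
--         list_of_subproblems.append(subproblems)
--     return list_of_subproblems
-- ===== SOURCE B (Python) =====
-- from typing import List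
--
--
-- def cumulative_prefixes(sentences: List[str]) -> List[str]:
--     head = f"{sentences[0]}, {sentences[1]}"
--     return [head] + [", ".join(sentences[:k]) for k in range(3, len(sentences) + 1)]
--
--
-- def divide_l2m(prompts: List[str]) -> List[List[str]]:
--     return [cumulative_prefixes(prompt.split(", ")) for prompt in prompts]
-- ===== Notes on version B (the rewrite author's own statement) =====
-- stated objective: simpler
-- what changed: Replaces A's running-accumulator inner loop (repeatedly extending the last list element with ', ' + sentence) by recomputing each cumulative prefix independently as a join of a slice, ', '.join(sentences[:k]) for k in range(3, len+1), in a comprehension over the prompts.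
import Mathlib
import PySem

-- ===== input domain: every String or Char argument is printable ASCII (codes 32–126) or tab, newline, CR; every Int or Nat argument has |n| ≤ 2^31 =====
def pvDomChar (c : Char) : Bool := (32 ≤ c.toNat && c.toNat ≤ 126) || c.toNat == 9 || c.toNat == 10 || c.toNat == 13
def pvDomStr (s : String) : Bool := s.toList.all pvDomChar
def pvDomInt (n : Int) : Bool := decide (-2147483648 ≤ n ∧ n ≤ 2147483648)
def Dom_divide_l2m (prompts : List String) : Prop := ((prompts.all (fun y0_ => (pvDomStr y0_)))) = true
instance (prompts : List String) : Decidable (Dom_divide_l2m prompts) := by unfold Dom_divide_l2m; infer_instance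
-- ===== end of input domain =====

-- B replaces A's running-accumulator inner loop by directly recomputing each
-- cumulative prefix as ", ".join(sentences[:k]) for k in range(2, len+1) (objective: simpler).


-- ===== PORT A =====
-- per-prompt body of A's outer loop: split, seed with sentences[0] + ", " + sentences[1],
-- then extend the last accumulated subproblem with ", " + sentence for each remaining sentence.
-- sentences[0]/sentences[1] are ported with pyGetD (total form): Pre_ guarantees both indices in range.
def divideInner (sentences : List String) : List String :=
  (PySem.List.slice sentences (some 2) none).foldl
    (fun subproblems sentence =>
      subproblems ++ [PySem.List.pyGetD subproblems (-1) "" ++ ", " ++ sentence])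
    [PySem.List.pyGetD sentences 0 "" ++ ", " ++ PySem.List.pyGetD sentences 1 ""]

def divideBody (prompt : String) : List String :=
  divideInner ((PySem.Str.split? prompt ", ").getD [])

def divide_l2m (prompts : List String) : List (List String) :=
  prompts.foldl (fun acc prompt => acc ++ [divideBody prompt]) []

-- ===== PORT B =====
-- sentences[0]/sentences[1] of the head f-string ported with pyGetD (total form):
-- Pre_ guarantees both indices in range.
def cumulativePrefixes (sentences : List String) : List String :=
  (PySem.List.pyGetD sentences 0 "" ++ ", " ++ PySem.List.pyGetD sentences 1 "")
    :: (PySem.List.pyRange 3 ((sentences.length : Int) + 1) 1).map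
        (fun k => PySem.Str.join ", " (PySem.List.slice sentences none (some k)))

def divide_l2m_alt (prompts : List String) : List (List String) :=
  prompts.map (fun prompt => cumulativePrefixes ((PySem.Str.split? prompt ", ").getD []))

-- ===== PRECONDITION & SPEC =====
-- Pre_ excludes exactly the prompts that split into fewer than two sentences
-- (no ", " inside): there A raises IndexError at sentences[1].
def Pre_divide_l2m (prompts : List String) : Prop :=
  ∀ p ∈ prompts, 2 ≤ ((PySem.Str.split? p ", ").getD []).length
instance (prompts : List String) : Decidable (Pre_divide_l2m prompts) := by
  unfold Pre_divide_l2m; infer_instance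
def pvWitness_divide_l2m : List String := ["a, b, c", "d, e, f"]

def Spec_divide_l2m (prompts : List String) (out : List (List String)) : Prop :=
  out = divide_l2m_alt prompts
instance (prompts : List String) (out : List (List String)) : Decidable (Spec_divide_l2m prompts out) := by
  unfold Spec_divide_l2m; infer_instance

-- ===== CLAIM (what is proved, stated in full; the proofs are below) =====
def Claim_equal_divide_l2m : Prop := ∀ (prompts : List String), Dom_divide_l2m prompts → Pre_divide_l2m prompts → Spec_divide_l2m prompts (divide_l2m prompts)

-- ===== LEMMAS AND PROOFS =====

-- ", ".join over a snoc: specific joint fact of the two ports' string building.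
lemma charsJoin_append_singleton (sep : List Char) (ps : List (List Char)) (p : List Char)
    (h : ps ≠ []) :
    PySem.Chars.join sep (ps ++ [p]) = PySem.Chars.join sep ps ++ sep ++ p := by
  induction ps with
  | nil => cases h rfl
  | cons q t ih =>
    cases t with
    | nil => simp [PySem.Chars.join_cons_cons, PySem.Chars.join_singleton]
    | cons q' t' =>
      simp only [List.cons_append, PySem.Chars.join_cons_cons]
      have ih' := ih (by simp)
      rw [List.cons_append] at ih'
      rw [ih']
      simp [List.append_assoc]

lemma strJoin_append_singleton (pre : List String) (s : String) (h : pre ≠ []) :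
    PySem.Str.join ", " (pre ++ [s]) = PySem.Str.join ", " pre ++ ", " ++ s := by
  have hc := charsJoin_append_singleton [',', ' '] (pre.map String.toList) s.toList
    (by simpa using h)
  apply String.toList_injective
  simp only [PySem.Str.toList_join, List.map_append, List.map_cons, List.map_nil]
  simp only [show (", " : String).toList = [',', ' '] from rfl]
  rw [hc]
  simp

lemma strJoin_pair (s0 s1 : String) :
    PySem.Str.join ", " [s0, s1] = s0 ++ ", " ++ s1 := by
  apply String.toList_injective
  simp [PySem.Str.toList_join, PySem.Chars.join_cons_cons, PySem.Chars.join_singleton]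

-- A's inner accumulator loop, characterised: starting from acc ++ [join pre],
-- folding the remaining sentences produces the joins of all extended prefixes.
lemma chain (rest : List String) : ∀ (pre acc : List String), pre ≠ [] →
    rest.foldl
      (fun subproblems sentence =>
        subproblems ++ [PySem.List.pyGetD subproblems (-1) "" ++ ", " ++ sentence])
      (acc ++ [PySem.Str.join ", " pre])
    = acc ++ (List.range (rest.length + 1)).map
        (fun i => PySem.Str.join ", " (pre ++ rest.take i)) := by
  induction rest with
  | nil => intro pre acc h; simp
  | cons s rest' ih =>
    intro pre acc h
    rw [List.foldl_cons, PySem.List.pyGetD_neg_one_append_singleton,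
      ← strJoin_append_singleton pre s h]
    rw [ih (pre ++ [s]) (acc ++ [PySem.Str.join ", " pre]) (by simp)]
    rw [List.append_assoc]
    congr 1
    rw [List.length_cons]
    conv_rhs => rw [List.range_succ_eq_map]
    rw [List.map_cons, List.map_map, List.singleton_append]
    congr 1
    · simp
    · apply List.map_congr_left
      intro i _
      simp [List.append_assoc]

-- per-prompt equality under the length precondition
lemma body_eq (sentences : List String) (h : 2 ≤ sentences.length) :
    divideInner sentences = cumulativePrefixes sentences := by
  match sentences, h with
  | s0 :: s1 :: rest, _ =>
    unfold divideInner cumulativePrefixes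
    rw [PySem.List.slice_from _ (show (0:Int) ≤ 2 by norm_num)]
    have h0 : PySem.List.pyGetD (s0 :: s1 :: rest) (0 : Int) "" = s0 := by
      simp [pysem]
    have h1 : PySem.List.pyGetD (s0 :: s1 :: rest) (1 : Int) "" = s1 := by
      simp [pysem]
    rw [h0, h1]
    have hinit : [s0 ++ ", " ++ s1] = [] ++ [PySem.Str.join ", " [s0, s1]] := by
      simp [strJoin_pair]
    rw [show ((2 : Int)).toNat = 2 from rfl, List.drop_succ_cons, List.drop_succ_cons,
      List.drop_zero, hinit, chain rest [s0, s1] [] (by simp), List.nil_append]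
    rw [PySem.List.pyRange_one]
    have hlen : ((((s0 :: s1 :: rest).length : Int) + 1) - 3).toNat = rest.length := by
      simp; omega
    rw [hlen, List.map_map, List.range_succ_eq_map, List.map_cons, List.map_map]
    congr 1
    · simp [strJoin_pair]
    · apply List.map_congr_left
      intro i hi
      simp only [Function.comp_apply]
      congr 1
      rw [PySem.List.slice_to _ (by omega)]
      have h3i : ((3 : Int) + i).toNat = i + 1 + 1 + 1 := by omega
      rw [h3i, List.take_succ_cons, List.take_succ_cons]
      simp

-- ===== VERDICT (by name: the statement is the Claim_ definition above) =====
theorem divide_l2m_spec : Claim_equal_divide_l2m := by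
  intro prompts _ hpre
  unfold Spec_divide_l2m divide_l2m divide_l2m_alt
  rw [PySem.List.foldl_append_singleton_eq_map divideBody prompts []]
  simp only [List.nil_append]
  exact List.map_congr_left (fun p hp => body_eq _ (hpre p hp))
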